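-- pv_equiv track=rewrite | github.com/Paradiddle131/Scrabble-Solver | Automation/automation.py | remove_duplicates_from_order
-- ===== SOURCE A (Python) =====
-- def remove_duplicates_from_order(order):
--     locs = []
--     for item in order:
--         if len(item) > 1:
--             indices = [i for i, x in enumerate(order) if x == item]
--             if not locs.__contains__(indices):
--                 locs.append(indices)
--     for num in locs:
--         order[num[0]] = order[num[0]][0]
--         order[num[1]] = order[num[1]][1]
--     return order
-- ===== SOURCE B (Python) =====
-- def remove_duplicates_from_order(order):
--     # One-pass hash grouping: value -> list of indices, then rewrite the first
--     # two occurrences of each multi-character item (IndexError on a singleton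
--     # group, exactly as the original; excluded by Pre_).
--     groups = {}
--     for i, item in enumerate(order):
--         if len(item) > 1:
--             groups.setdefault(item, []).append(i)
--     for item, idxs in groups.items():
--         order[idxs[0]] = item[0]
--         order[idxs[1]] = item[1]
--     return order
-- ===== Notes on version B (the rewrite author's own statement) =====
-- stated objective: faster
-- what changed: A rescans the whole list with enumerate for every item and dedupes index groups by list membership (quadratic, plus a per-group rescan); B builds a value-to-indices dict in one pass and rewrites the first two occurrences of each duplicated item from it.
import Mathlib
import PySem

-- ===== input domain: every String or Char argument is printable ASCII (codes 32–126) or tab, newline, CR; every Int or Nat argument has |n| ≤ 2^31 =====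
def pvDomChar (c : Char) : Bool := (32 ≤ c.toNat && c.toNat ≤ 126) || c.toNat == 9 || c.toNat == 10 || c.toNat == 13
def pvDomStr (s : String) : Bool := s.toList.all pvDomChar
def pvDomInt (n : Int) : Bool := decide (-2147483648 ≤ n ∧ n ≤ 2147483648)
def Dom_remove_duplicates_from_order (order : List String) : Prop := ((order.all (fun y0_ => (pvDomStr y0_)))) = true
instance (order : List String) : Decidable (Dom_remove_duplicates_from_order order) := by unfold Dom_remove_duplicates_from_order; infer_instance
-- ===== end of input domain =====

-- B replaces A's quadratic rescan-and-dedupe of index groups by a one-pass hash grouping (value -> index list);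
-- the equivalence proved is about the RETURN value (both Pythons also mutate `order` in place, identically inside Pre_).

-- ===== PORT A =====

-- Python s[i] on a string: a one-character string; `none` = IndexError (unreachable under Pre_, fallback s).
def pvCharAt (s : String) (i : Int) : String :=
  match PySem.Str.pyGet? s i with
  | some c => String.ofList [c]
  | none => s

-- [i for i, x in enumerate(order) if x == item]
def pvIndices (order : List String) (item : String) : List Int :=
  (PySem.List.enumerate order 0).foldl
    (fun acc p => if p.2 == item then acc ++ [p.1] else acc) []

def remove_duplicates_from_order (order : List String) : List String :=
  -- order[num[0]] = order[num[0]][0]; order[num[1]] = order[num[1]][1]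
  -- (num[0]/num[1]: IndexError when the group is a singleton — excluded by Pre_; pyGetD's default is unreachable there)
  (order.foldl
    (fun locs item =>
      if 1 < PySem.Str.len item then
        (if locs.contains (pvIndices order item) then locs else locs ++ [pvIndices order item])
      else locs) ([] : List (List Int))).foldl
    (fun ord num =>
      let i0 := PySem.List.pyGetD num 0 0
      let ord1 := PySem.List.pySetD ord i0 (pvCharAt (PySem.List.pyGetD ord i0 "") 0)
      let i1 := PySem.List.pyGetD num 1 0
      PySem.List.pySetD ord1 i1 (pvCharAt (PySem.List.pyGetD ord1 i1 "") 1)) order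

-- ===== PORT B =====

-- groups.setdefault(item, []).append(i), one pass over enumerate(order); idxs[0]/idxs[1]:
-- IndexError on a singleton group, as in A — excluded by Pre_, pyGetD's default unreachable there
def remove_duplicates_from_order_alt (order : List String) : List String :=
  ((PySem.List.enumerate order 0).foldl
    (fun d p => if 1 < PySem.Str.len p.2 then d.modify p.2 [] (· ++ [p.1]) else d)
    (PySem.Dict.empty : PySem.Dict String (List Int))).items.foldl
    (fun ord it =>
      let ord1 := PySem.List.pySetD ord (PySem.List.pyGetD it.2 0 0) (pvCharAt it.1 0)
      PySem.List.pySetD ord1 (PySem.List.pyGetD it.2 1 0) (pvCharAt it.1 1)) order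

-- ===== PRECONDITION & SPEC =====

-- Pre_ excludes inputs holding a multi-character string that occurs only once: there A raises IndexError
-- (num[1] on a singleton index group), so A returns on no excluded input.
def Pre_remove_duplicates_from_order (order : List String) : Prop :=
  ∀ s ∈ order, 1 < s.length → 2 ≤ order.count s
instance (order : List String) : Decidable (Pre_remove_duplicates_from_order order) := by
  unfold Pre_remove_duplicates_from_order; infer_instance

def pvWitness_remove_duplicates_from_order : List String := ["ab", "x", "ab"]

def Spec_remove_duplicates_from_order (order : List String) (out : List String) : Prop :=
  out = remove_duplicates_from_order_alt order
instance (order : List String) (out : List String) : Decidable (Spec_remove_duplicates_from_order order out) := by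
  unfold Spec_remove_duplicates_from_order; infer_instance

-- ===== CLAIM (what is proved, stated in full; the proofs are below) =====
def Claim_equal_remove_duplicates_from_order : Prop := ∀ (order : List String), Dom_remove_duplicates_from_order order → Pre_remove_duplicates_from_order order → Spec_remove_duplicates_from_order order (remove_duplicates_from_order order)


-- ===== LEMMAS AND PROOFS =====

def pvMulti (s : String) : Bool := decide (1 < PySem.Str.len s)

-- B's grouping dict, named for the proofs (definitionally the fold inside the alt port)
def pvGroups (order : List String) : PySem.Dict String (List Int) :=
  (PySem.List.enumerate order 0).foldl
    (fun d p => if 1 < PySem.Str.len p.2 then d.modify p.2 [] (· ++ [p.1]) else d)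
    PySem.Dict.empty

theorem pvIndices_eq (order : List String) (item : String) :
    pvIndices order item
      = ((PySem.List.enumerate order 0).filter (fun p => p.2 == item)).map (·.1) := by
  unfold pvIndices
  simpa using PySem.List.foldl_append_if (fun p => p.2 == item) (fun p : Int × String => p.1) (PySem.List.enumerate order 0) []

theorem mem_pvIndices (order : List String) (item : String) (i : Int) :
    i ∈ pvIndices order item ↔ ∃ (n : Nat) (h : n < order.length), i = (n : Int) ∧ order[n] = item := by
  rw [pvIndices_eq]
  simp only [List.mem_map, List.mem_filter, PySem.List.mem_enumerate_iff]
  constructor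
  · rintro ⟨p, ⟨⟨n, hn, rfl⟩, hb⟩, rfl⟩
    refine ⟨n, hn, by simp, by simpa using hb⟩
  · rintro ⟨n, hn, rfl, h⟩
    exact ⟨((n:Int), order[n]), ⟨⟨n, hn, by simp⟩, by simpa using h⟩, rfl⟩

theorem pvIndices_length (order : List String) (item : String) :
    (pvIndices order item).length = order.count item := by
  rw [pvIndices_eq, List.length_map, ← List.countP_eq_length_filter]
  have h := PySem.List.map_snd_enumerate order 0
  calc (PySem.List.enumerate order 0).countP (fun p => p.2 == item)
      = ((PySem.List.enumerate order 0).map (·.2)).countP (fun x => x == item) := by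
        rw [List.countP_map]; rfl
    _ = order.count item := by rw [h]; rfl

theorem pvIndices_pairwise (order : List String) (item : String) :
    (pvIndices order item).Pairwise (· < ·) := by
  rw [pvIndices_eq]
  exact ((PySem.List.pairwise_lt_enumerate order 0).filter _).map _ (fun a b h => h)

theorem pvIndices_inj (order : List String) {a b : String} (ha : a ∈ order)
    (h : pvIndices order a = pvIndices order b) : a = b := by
  have hlen : 0 < (pvIndices order a).length := by
    rw [pvIndices_length]; exact List.count_pos_iff.mpr ha
  obtain ⟨i, hi⟩ := List.exists_mem_of_length_pos hlen
  obtain ⟨n, hn, rfl, hna⟩ := (mem_pvIndices order a i).mp hi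
  obtain ⟨m, hm, he, hmb⟩ := (mem_pvIndices order b _).mp (h ▸ hi)
  have : m = n := by exact_mod_cast he.symm
  subst this; rw [← hna, hmb]

theorem locs_fold (order : List String) : ∀ (l : List String) (D : List String),
    (∀ d ∈ D, d ∈ order) → (∀ x ∈ l, x ∈ order) →
    l.foldl (fun locs item =>
        if 1 < PySem.Str.len item then
          (if locs.contains (pvIndices order item) then locs else locs ++ [pvIndices order item])
        else locs) (D.map (pvIndices order))
      = (l.foldl (fun D item => if pvMulti item then PySem.Set.add D item else D) D).map (pvIndices order) := by
  intro l
  induction l with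
  | nil => intro D _ _; rfl
  | cons x xs ih =>
    intro D hD hl
    have hx : x ∈ order := hl x (List.mem_cons_self)
    simp only [List.foldl_cons]
    by_cases hm : 1 < PySem.Str.len x
    · have hmb : pvMulti x = true := by simp only [pvMulti, decide_eq_true_eq]; exact hm
      rw [if_pos hm, hmb, if_pos rfl]
      have hcont : (D.map (pvIndices order)).contains (pvIndices order x) = D.contains x := by
        simp only [List.contains_eq_mem, List.mem_map, decide_eq_decide]
        constructor
        · rintro ⟨d, hd, he⟩; rwa [← pvIndices_inj order (hD d hd) he]
        · intro h; exact ⟨x, h, rfl⟩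
      rw [hcont]
      by_cases hc : D.contains x = true
      · rw [if_pos hc]
        have hadd : PySem.Set.add D x = D := by rw [PySem.Set.add, PySem.Set.contains_eq_listContains, if_pos hc]
        rw [hadd]
        exact ih D hD (fun y hy => hl y (List.mem_cons_of_mem _ hy))
      · rw [if_neg hc]
        have hadd : PySem.Set.add D x = D ++ [x] := by rw [PySem.Set.add, PySem.Set.contains_eq_listContains, if_neg hc]
        rw [hadd]
        have hmap : List.map (pvIndices order) D ++ [pvIndices order x]
            = List.map (pvIndices order) (D ++ [x]) := by simp
        rw [hmap]
        refine ih (D ++ [x]) ?_ (fun y hy => hl y (List.mem_cons_of_mem _ hy))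
        intro d hd
        rcases List.mem_append.mp hd with h | h
        · exact hD d h
        · simpa using (List.mem_singleton.mp h) ▸ hx
    · have hmb : ¬ (pvMulti x = true) := by simp only [pvMulti, decide_eq_true_eq]; exact hm
      rw [if_neg hm, if_neg hmb]
      exact ih D hD (fun y hy => hl y (List.mem_cons_of_mem _ hy))

-- the dedup fold is Set.ofList of the filtered list

theorem dedup_fold_eq (order : List String) :
    order.foldl (fun D item => if pvMulti item then PySem.Set.add D item else D) []
      = PySem.Set.ofList (order.filter pvMulti) := by
  unfold PySem.Set.ofList
  rw [List.foldl_filter]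
  rfl

theorem pvGroups_eq (order : List String) :
    pvGroups order
      = ((PySem.List.enumerate order 0).filter (fun p => pvMulti p.2)).foldl
          (fun d p => d.modify p.2 [] (· ++ [p.1])) PySem.Dict.empty := by
  unfold pvGroups
  rw [List.foldl_filter]
  apply PySem.List.foldl_congr_mem
  intro d p _
  by_cases h : 1 < PySem.Str.len p.2
  · rw [if_pos h, if_pos (by simpa [pvMulti] using h)]
  · rw [if_neg h, if_neg (by simpa [pvMulti] using h)]

theorem map_snd_filter_enumerate (order : List String) :
    ((PySem.List.enumerate order 0).filter (fun p => pvMulti p.2)).map (·.2)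
      = order.filter pvMulti := by
  have h : (PySem.List.enumerate order 0).map (·.2) = order := PySem.List.map_snd_enumerate order 0
  calc ((PySem.List.enumerate order 0).filter (fun p => pvMulti p.2)).map (·.2)
      = ((PySem.List.enumerate order 0).map (·.2)).filter pvMulti := by
        rw [List.filter_map]; rfl
    _ = order.filter pvMulti := by rw [h]

theorem pvGroups_keys (order : List String) :
    (pvGroups order).keys = PySem.Set.ofList (order.filter pvMulti) := by
  rw [pvGroups_eq]
  rw [PySem.Dict.keys_foldl_modify_key
    ((PySem.List.enumerate order 0).filter (fun p => pvMulti p.2))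
    (fun p => p.2) []
    (fun (_ : PySem.Dict String (List Int)) (p : Int × String) (x : List Int) => x ++ [p.1])
    PySem.Dict.empty]
  rw [map_snd_filter_enumerate]
  rfl

theorem pvGroups_nodup (order : List String) : (pvGroups order).keys.Nodup := by
  rw [pvGroups_eq]
  exact PySem.Dict.nodup_keys_foldl_modify_key
    ((PySem.List.enumerate order 0).filter (fun p => pvMulti p.2))
    (fun p => p.2) []
    (fun (_ : PySem.Dict String (List Int)) (p : Int × String) (x : List Int) => x ++ [p.1])
    PySem.Dict.empty (by simp)

theorem pvGroups_getD (order : List String) (k : String) (hk : pvMulti k = true) :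
    (pvGroups order).getD k [] = pvIndices order k := by
  rw [pvGroups_eq]
  have hswap : ((PySem.List.enumerate order 0).filter (fun p => pvMulti p.2)).foldl
      (fun d p => d.modify p.2 [] (· ++ [p.1])) PySem.Dict.empty
      = (((PySem.List.enumerate order 0).filter (fun p => pvMulti p.2)).map (fun p => (p.2, p.1))).foldl
      (fun d q => d.modify q.1 [] (· ++ [q.2])) PySem.Dict.empty := by
    rw [List.foldl_map]
  rw [hswap, PySem.Dict.getD_foldl_modify_append]
  simp only [PySem.Dict.getD_empty, List.nil_append, List.filter_map, List.map_map]
  rw [pvIndices_eq, List.filter_filter]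
  congr 1
  apply List.filter_congr
  intro p _
  by_cases h : p.2 == k
  · have : p.2 = k := by simpa using h
    simp [this, hk, Function.comp]
  · simp [h, Function.comp]

theorem pvGroups_items (order : List String) :
    (pvGroups order).items
      = (PySem.Set.ofList (order.filter pvMulti)).map (fun k => (k, pvIndices order k)) := by
  rw [← pvGroups_keys order]
  have hkeys : (pvGroups order).keys = (pvGroups order).items.map (fun p => p.1) := rfl
  rw [hkeys, List.map_map]
  have h : ∀ p ∈ (pvGroups order).items,
      ((fun k : String => (k, pvIndices order k)) ∘ (fun p : String × List Int => p.1)) p = id p := by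
    intro p hp
    obtain ⟨k, v⟩ := p
    have h2 : (pvGroups order).getD k [] = v :=
      PySem.Dict.getD_of_mem_items _ hp (pvGroups_nodup order) []
    have hk1 : k ∈ (pvGroups order).keys := PySem.Dict.mem_keys_of_mem_items _ hp
    have hmul : pvMulti k = true := by
      rw [pvGroups_keys order] at hk1
      have := (PySem.Set.mem_ofList _ _).mp hk1
      exact (List.mem_filter.mp this).2
    have h3 := pvGroups_getD order k hmul
    show (k, pvIndices order k) = (k, v)
    rw [← h3, h2]
  rw [List.map_congr_left h, List.map_id]

theorem pvApply_fold (order : List String) : ∀ (ks : List String) (ord : List String),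
    ord.length = order.length →
    ks.Nodup →
    (∀ k ∈ ks, 2 ≤ (pvIndices order k).length) →
    (∀ k ∈ ks, ∀ (n : Nat), (h : n < order.length) → order[n] = k →
      PySem.List.pyGetD ord (n : Int) "" = k) →
    ks.foldl (fun ord k =>
        let i0 := PySem.List.pyGetD (pvIndices order k) 0 0
        let ord1 := PySem.List.pySetD ord i0 (pvCharAt (PySem.List.pyGetD ord i0 "") 0)
        let i1 := PySem.List.pyGetD (pvIndices order k) 1 0
        PySem.List.pySetD ord1 i1 (pvCharAt (PySem.List.pyGetD ord1 i1 "") 1)) ord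
    = ks.foldl (fun ord k =>
        let ord1 := PySem.List.pySetD ord (PySem.List.pyGetD (pvIndices order k) 0 0) (pvCharAt k 0)
        PySem.List.pySetD ord1 (PySem.List.pyGetD (pvIndices order k) 1 0) (pvCharAt k 1)) ord := by
  intro ks
  induction ks with
  | nil => intro ord _ _ _ _; rfl
  | cons k ks ih =>
    intro ord hlen hnd hg2 hag
    have hnd' := List.nodup_cons.mp hnd
    have hgk : 2 ≤ (pvIndices order k).length := hg2 k List.mem_cons_self
    have h0lt : 0 < (pvIndices order k).length := by omega
    have h1lt : 1 < (pvIndices order k).length := by omega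
    obtain ⟨n0, hn0, he0, ho0⟩ :=
      (mem_pvIndices order k _).mp (List.getElem_mem h0lt)
    obtain ⟨n1, hn1, he1, ho1⟩ :=
      (mem_pvIndices order k _).mp (List.getElem_mem h1lt)
    have hlt : (pvIndices order k)[0] < (pvIndices order k)[1] :=
      List.pairwise_iff_getElem.mp (pvIndices_pairwise order k) 0 1 h0lt h1lt (by omega)
    have hne : n0 ≠ n1 := by
      intro h; rw [he0, he1, h] at hlt; exact lt_irrefl _ hlt
    have hi0 : PySem.List.pyGetD (pvIndices order k) 0 0 = (n0 : Int) := by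
      rw [PySem.List.pyGetD_zero, List.getD_eq_getElem _ _ h0lt, he0]
    have hi1 : PySem.List.pyGetD (pvIndices order k) 1 0 = (n1 : Int) := by
      have : ((1 : Nat) : Int) = (1 : Int) := by norm_num
      rw [← this, PySem.List.pyGetD_natCast, List.getD_eq_getElem _ _ h1lt, he1]
    simp only [List.foldl_cons]
    -- rewrite the A-step and B-step into a common form
    have hget0 : PySem.List.pyGetD ord (n0 : Int) "" = k := hag k List.mem_cons_self n0 hn0 ho0
    simp only [hi0, hi1, hget0]
    have hget1 : PySem.List.pyGetD (PySem.List.pySetD ord (n0 : Int) (pvCharAt k 0)) (n1 : Int) "" = k := by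
      rw [PySem.List.pyGetD_pySetD_natCast ord n0 n1 _ _ (by omega)]
      rw [if_neg (Ne.symm hne)]
      exact hag k List.mem_cons_self n1 hn1 ho1
    rw [hget1]
    -- common new state; apply the IH
    apply ih
    · rw [PySem.List.length_pySetD, PySem.List.length_pySetD]; exact hlen
    · exact hnd'.2
    · exact fun k' hk' => hg2 k' (List.mem_cons_of_mem _ hk')
    · intro k' hk' n hn ho
      have hkne : k' ≠ k := by rintro rfl; exact hnd'.1 hk'
      have hnn0 : n ≠ n0 := by rintro rfl; rw [ho0] at ho; exact hkne ho.symm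
      have hnn1 : n ≠ n1 := by rintro rfl; rw [ho1] at ho; exact hkne ho.symm
      rw [PySem.List.pyGetD_pySetD_natCast _ n1 n _ _
        (by rw [PySem.List.length_pySetD]; omega), if_neg hnn1]
      rw [PySem.List.pyGetD_pySetD_natCast _ n0 n _ _ (by omega), if_neg hnn0]
      exact hag k' (List.mem_cons_of_mem _ hk') n hn ho

theorem pv_main (order : List String)
    (hpre : Pre_remove_duplicates_from_order order) :
    remove_duplicates_from_order order = remove_duplicates_from_order_alt order := by
  unfold remove_duplicates_from_order remove_duplicates_from_order_alt
  have hgroups : (PySem.List.enumerate order 0).foldl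
      (fun d p => if 1 < PySem.Str.len p.2 then d.modify p.2 [] (· ++ [p.1]) else d)
      (PySem.Dict.empty : PySem.Dict String (List Int)) = pvGroups order := rfl
  rw [hgroups, pvGroups_items order]
  have hlocs : order.foldl
      (fun locs item =>
        if 1 < PySem.Str.len item then
          (if locs.contains (pvIndices order item) then locs else locs ++ [pvIndices order item])
        else locs) ([] : List (List Int))
      = (PySem.Set.ofList (order.filter pvMulti)).map (pvIndices order) := by
    have h := locs_fold order order [] (by simp) (fun x hx => hx)
    simpa [dedup_fold_eq] using h
  rw [hlocs, List.foldl_map, List.foldl_map]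
  have hmem : ∀ k ∈ PySem.Set.ofList (order.filter pvMulti), k ∈ order ∧ pvMulti k = true := by
    intro k hk
    have := (PySem.Set.mem_ofList _ _).mp hk
    exact ⟨(List.mem_filter.mp this).1, (List.mem_filter.mp this).2⟩
  exact pvApply_fold order (PySem.Set.ofList (order.filter pvMulti)) order rfl
    (PySem.Set.nodup_ofList _)
    (fun k hk => by
      obtain ⟨hko, hkm⟩ := hmem k hk
      have hcount := hpre k hko (by
        have := of_decide_eq_true hkm
        have hl : PySem.Str.len k = (k.length : Int) := PySem.Str.len_eq k
        rw [hl] at this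
        exact_mod_cast this)
      rw [pvIndices_length]; exact hcount)
    (fun k hk n hn ho => by
      rw [PySem.List.pyGetD_natCast, List.getD_eq_getElem _ _ hn]; exact ho)

-- ===== VERDICT (by name: the statement is the Claim_ definition above) =====
theorem remove_duplicates_from_order_spec : Claim_equal_remove_duplicates_from_order := by
  intro order _ hpre
  unfold Spec_remove_duplicates_from_order
  exact pv_main order hpre
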